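-- pv_equiv track=rewrite | github.com/gxherror/mysql_golang | rdbd.py | ge_superkey
-- ===== SOURCE A (Python) =====
-- def ge_superkey(R,F):
--     K=set()
--     for tuple in F:
--         set_k,set_v=tuple
--         result=closure_AS(set_k,F)
--         if result==R:
--             K.add(frozenset(set_k))
--             #! update a set as union
--             #! add a set as a element
--     return K
--
-- def closure_AS(AS,F):
--
--     result=AS
--     while(1):
--         result_old=result
--         for tuple in F:
--             set_k,set_v=tuple
--             if set_k.issubset(result):#!
--                 result = result.union(set_v)
--         if result_old==result:
--             break
--     return result
-- ===== SOURCE B (Python) =====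
-- def ge_superkey(R, F):
--     # build once: per-FD counter of LHS attributes, and an index
--     # attribute -> FDs mentioning it on the left (Beeri-Bernstein)
--     occ = {}
--     count = {}
--     for i, (lhs, rhs) in enumerate(F):
--         count[i] = len(lhs)
--         for a in lhs:
--             occ.setdefault(a, []).append(i)
--     K = set()
--     for lhs, rhs in F:
--         if closure_linear(lhs, F, occ, count) == R:
--             K.add(frozenset(lhs))
--     return K
--
-- def _fire(rhs, closure, queue):
--     for b in rhs:
--         if b not in closure:
--             closure.add(b)
--             queue.append(b)
--
-- def closure_linear(AS, F, occ, count):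
--     # linear attribute closure: worklist of derived-but-unprocessed attributes
--     cnt = dict(count)
--     closure = set(AS)
--     queue = list(closure)
--     for i, (lhs, rhs) in enumerate(F):
--         if cnt[i] == 0:
--             _fire(rhs, closure, queue)
--     while queue:
--         a = queue.pop()
--         for i in occ.get(a, []):
--             cnt[i] -= 1
--             if cnt[i] == 0:
--                 _fire(F[i][1], closure, queue)
--     return closure
-- ===== Notes on version B (the rewrite author's own statement) =====
-- stated objective: alternative
-- what changed: Replaces A's repeated fixpoint passes over F (one subset test per FD per pass) by the counter/worklist attribute-closure algorithm: per-FD counters of not-yet-derived LHS attributes and an attribute-to-FD index built once, a queue of derived attributes driving counter decrements, firing an FD exactly when its counter reaches zero.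
import Mathlib
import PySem

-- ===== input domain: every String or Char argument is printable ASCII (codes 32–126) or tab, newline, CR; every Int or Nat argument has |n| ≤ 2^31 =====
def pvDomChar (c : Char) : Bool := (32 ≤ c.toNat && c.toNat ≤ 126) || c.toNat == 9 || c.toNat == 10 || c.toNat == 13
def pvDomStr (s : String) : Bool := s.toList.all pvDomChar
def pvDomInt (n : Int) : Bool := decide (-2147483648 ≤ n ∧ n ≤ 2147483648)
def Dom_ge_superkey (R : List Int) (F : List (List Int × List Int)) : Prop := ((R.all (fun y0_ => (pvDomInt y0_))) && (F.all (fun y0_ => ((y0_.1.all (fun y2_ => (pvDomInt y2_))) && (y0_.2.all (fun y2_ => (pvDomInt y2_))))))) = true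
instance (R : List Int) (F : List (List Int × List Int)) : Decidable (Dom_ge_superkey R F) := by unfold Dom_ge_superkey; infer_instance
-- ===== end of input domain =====

-- B replaces A's repeated fixpoint passes (a subset test per FD per pass) by a counter/worklist
-- attribute closure (Beeri-Bernstein): per-FD counters of not-yet-derived LHS attributes and an
-- attribute-to-FD index, built once and copied per closure (objective: alternative; same value).

-- ===== PORT A =====
-- one inner 'for tuple in F' pass of closure_AS
def geSkPassA (r : PySem.Set Int) (l : List (List Int × List Int)) : PySem.Set Int :=
  l.foldl (fun r kv => if PySem.Set.issubset kv.1 r then PySem.Set.union r kv.2 else r) r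

-- the 'while(1)' loop; the fuel argument is only a totality guard (proved sufficient below:
-- every continuing iteration adds a new element drawn from the right-hand sides)
def geSkLoopA (F : List (List Int × List Int)) : Nat → PySem.Set Int → PySem.Set Int
  | 0, r => r
  | fuel+1, r =>
    let r' := geSkPassA r F
    if PySem.Set.equal r r' then r else geSkLoopA F fuel r'

def closure_AS (AS : List Int) (F : List (List Int × List Int)) : List Int :=
  geSkLoopA F ((F.flatMap (fun kv => kv.2)).length + 1) AS

def ge_superkey (R : List Int) (F : List (List Int × List Int)) : List (List Int) :=
  F.foldl (fun K kv =>
    if PySem.Set.equal (closure_AS kv.1 F) R then PySem.Set.add K (PySem.Set.ofList kv.1) else K) []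

-- ===== PORT B =====
-- build loop: 'count[i] = len(lhs); for a in lhs: occ.setdefault(a, []).append(i)'
def geSkBuildB (F : List (List Int × List Int)) :
    PySem.Dict Int (List Int) × PySem.Dict Int Int :=
  (PySem.List.enumerate F 0).foldl
    (fun st p =>
      (p.2.1.foldl (fun occ a => occ.modify a [] (· ++ [p.1])) st.1,
       st.2.insert p.1 (p.2.1.length : Int)))
    (PySem.Dict.empty, PySem.Dict.empty)

-- helper _fire(rhs, closure, queue)
def geSkFireB (rhs : List Int) (st : PySem.Set Int × List Int) : PySem.Set Int × List Int :=
  rhs.foldl (fun st b =>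
    if PySem.Set.contains st.1 b then st else (PySem.Set.add st.1 b, st.2 ++ [b])) st

-- 'for i, (lhs, rhs) in enumerate(F): if count[i] == 0: _fire(rhs, ...)'
def geSkInitB (F : List (List Int × List Int)) (cnt : PySem.Dict Int Int)
    (st : PySem.Set Int × List Int) : PySem.Set Int × List Int :=
  (PySem.List.enumerate F 0).foldl
    (fun st p => if cnt.getD p.1 0 == 0 then geSkFireB p.2.2 st else st) st

-- body of 'for i in occ.get(a, [])': decrement count[i], fire at zero
-- (i is always an enumerate index, 0 <= i < len(F), so the total pyGetD is exact for F[i])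
def geSkStepB (F : List (List Int × List Int))
    (st : PySem.Set Int × List Int × PySem.Dict Int Int) (i : Int) :
    PySem.Set Int × List Int × PySem.Dict Int Int :=
  let cnt' := st.2.2.insert i (st.2.2.getD i 0 - 1)
  if cnt'.getD i 0 == 0 then
    let fr := geSkFireB (PySem.List.pyGetD F i ([], [])).2 (st.1, st.2.1)
    (fr.1, fr.2, cnt')
  else (st.1, st.2.1, cnt')

-- 'while queue: a = queue.pop(); ...'; the fuel argument is only a totality guard
-- (proved sufficient below: each queue element is enqueued and popped at most once)
def geSkProcB (F : List (List Int × List Int)) (occ : PySem.Dict Int (List Int)) :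
    Nat → PySem.Set Int → List Int → PySem.Dict Int Int → PySem.Set Int
  | 0, C, _, _ => C
  | fuel+1, C, Q, cnt =>
    match PySem.List.pop? Q (-1) with
    | none => C
    | some (a, Q') =>
      let st := (occ.getD a []).foldl (geSkStepB F) (C, Q', cnt)
      geSkProcB F occ fuel st.1 st.2.1 st.2.2

-- 'cnt = dict(count)' is a fresh copy in Python; value-identical here
def closure_linear (AS : List Int) (F : List (List Int × List Int))
    (occ : PySem.Dict Int (List Int)) (count : PySem.Dict Int Int) : PySem.Set Int :=
  let cnt := count
  let C0 := PySem.Set.ofList AS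
  let st1 := geSkInitB F cnt (C0, C0)
  geSkProcB F occ (AS.length + 2 * (F.flatMap (fun kv => kv.2)).length + 1) st1.1 st1.2 cnt

def ge_superkey_alt (R : List Int) (F : List (List Int × List Int)) : List (List Int) :=
  let b := geSkBuildB F
  F.foldl (fun K kv =>
    if PySem.Set.equal (closure_linear kv.1 F b.1 b.2) R then PySem.Set.add K (PySem.Set.ofList kv.1) else K) []

-- ===== PRECONDITION & SPEC =====
def Spec_ge_superkey (R : List Int) (F : List (List Int × List Int)) (out : List (List Int)) : Prop := out = ge_superkey_alt R F
instance (R : List Int) (F : List (List Int × List Int)) (out : List (List Int)) : Decidable (Spec_ge_superkey R F out) := by unfold Spec_ge_superkey; infer_instance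

-- ===== CLAIM (what is proved, stated in full; the proofs are below) =====
def Claim_equal_ge_superkey : Prop := ∀ (R : List Int) (F : List (List Int × List Int)), Dom_ge_superkey R F → Spec_ge_superkey R F (ge_superkey R F)

-- ===== LEMMAS AND PROOFS =====

-- attributes derivable from AS under the FDs in F: the mathematical closure both programs compute
inductive geSkDeriv (AS : List Int) (F : List (List Int × List Int)) : Int → Prop
  | base (a : Int) : a ∈ AS → geSkDeriv AS F a
  | step (k v : List Int) (b : Int) : (k, v) ∈ F → (∀ x ∈ k, geSkDeriv AS F x) →
      b ∈ v → geSkDeriv AS F b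

theorem geSkDeriv_le (AS : List Int) (F : List (List Int × List Int)) (S : List Int)
    (hAS : ∀ a ∈ AS, a ∈ S)
    (hcl : ∀ kv ∈ F, (∀ x ∈ kv.1, x ∈ S) → ∀ y ∈ kv.2, y ∈ S) :
    ∀ x, geSkDeriv AS F x → x ∈ S := by
  intro x h
  induction h with
  | base a ha => exact hAS a ha
  | step k v b hkv hk hb ih => exact hcl (k, v) hkv ih b hb

-- ---- A side: the pass only grows the result ----
theorem geSkPassA_mono (l : List (List Int × List Int)) (r : PySem.Set Int) (y : Int)
    (hy : y ∈ r) : y ∈ geSkPassA r l := by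
  induction l generalizing r with
  | nil => simpa [geSkPassA] using hy
  | cons kv tl ih =>
    simp only [geSkPassA, List.foldl_cons] at *
    split
    · exact ih _ ((PySem.Set.mem_union _ _ _).mpr (Or.inl hy))
    · exact ih _ hy

theorem geSkPassA_elems (l : List (List Int × List Int)) (r : PySem.Set Int) (y : Int)
    (hy : y ∈ geSkPassA r l) : y ∈ r ∨ ∃ kv ∈ l, y ∈ kv.2 := by
  induction l generalizing r with
  | nil => exact Or.inl (by simpa [geSkPassA] using hy)
  | cons kv tl ih =>
    simp only [geSkPassA, List.foldl_cons] at hy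
    rcases ih _ hy with h | ⟨kv', h1, h2⟩
    · by_cases hs : PySem.Set.issubset kv.1 r = true
      · simp only [hs, if_true] at h
        rcases (PySem.Set.mem_union _ _ _).mp h with h | h
        · exact Or.inl h
        · exact Or.inr ⟨kv, List.mem_cons_self, h⟩
      · simp only [hs, if_false] at h
        exact Or.inl h
    · exact Or.inr ⟨kv', List.mem_cons_of_mem _ h1, h2⟩

theorem geSkPassA_sound (AS : List Int) (F l : List (List Int × List Int))
    (hl : ∀ kv ∈ l, kv ∈ F) (r : PySem.Set Int)
    (hr : ∀ y ∈ r, geSkDeriv AS F y) :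
    ∀ y ∈ geSkPassA r l, geSkDeriv AS F y := by
  induction l generalizing r with
  | nil => simpa [geSkPassA] using hr
  | cons kv tl ih =>
    intro y hy
    simp only [geSkPassA, List.foldl_cons] at hy
    refine ih (fun kv' h => hl kv' (List.mem_cons_of_mem _ h)) _ ?_ y hy
    intro z hz
    by_cases hs : PySem.Set.issubset kv.1 r = true
    · simp only [hs, if_true] at hz
      rcases (PySem.Set.mem_union _ _ _).mp hz with h | h
      · exact hr z h
      · exact geSkDeriv.step kv.1 kv.2 z
          (by have := hl kv List.mem_cons_self; simpa using this)
          (fun x hx => hr x ((PySem.Set.issubset_iff _ _).mp hs x hx)) h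
    · simp only [hs, if_false] at hz
      exact hr z hz

theorem geSkPassA_fire (l : List (List Int × List Int)) (k v : List Int)
    (hkv : (k, v) ∈ l) (r : PySem.Set Int) (hk : ∀ x ∈ k, x ∈ r) :
    ∀ y ∈ v, y ∈ geSkPassA r l := by
  induction l generalizing r with
  | nil => simp at hkv
  | cons kv tl ih =>
    intro y hy
    simp only [geSkPassA, List.foldl_cons]
    rcases List.mem_cons.mp hkv with h | h
    · subst h
      have hs : PySem.Set.issubset k r = true := (PySem.Set.issubset_iff _ _).mpr hk
      simp only [hs, if_true]
      exact geSkPassA_mono tl _ y ((PySem.Set.mem_union _ _ _).mpr (Or.inr hy))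
    · refine ih h _ ?_ y hy
      intro x hx
      split
      · exact (PySem.Set.mem_union _ _ _).mpr (Or.inl (hk x hx))
      · exact hk x hx

theorem geSkLoopA_mono (F : List (List Int × List Int)) (fuel : Nat) (r : PySem.Set Int)
    (y : Int) (hy : y ∈ r) : y ∈ geSkLoopA F fuel r := by
  induction fuel generalizing r with
  | zero => simpa [geSkLoopA] using hy
  | succ n ih =>
    simp only [geSkLoopA]
    split
    · exact hy
    · exact ih _ (geSkPassA_mono F r y hy)

theorem geSkLoopA_sound (AS : List Int) (F : List (List Int × List Int)) (fuel : Nat)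
    (r : PySem.Set Int) (hr : ∀ y ∈ r, geSkDeriv AS F y) :
    ∀ y ∈ geSkLoopA F fuel r, geSkDeriv AS F y := by
  induction fuel generalizing r with
  | zero => simpa [geSkLoopA] using hr
  | succ n ih =>
    simp only [geSkLoopA]
    split
    · exact hr
    · exact ih _ (geSkPassA_sound AS F F (fun _ h => h) r hr)

-- strict decrease of countP, used for both fuel-sufficiency arguments
theorem geSkCountP_lt {alpha : Type} (l : List alpha) (p q : alpha → Bool)
    (himp : ∀ a, p a = true → q a = true) (x : alpha) (hx : x ∈ l)
    (hqx : q x = true) (hpx : p x = false) : l.countP p < l.countP q := by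
  induction l with
  | nil => simp at hx
  | cons a tl ih =>
    simp only [List.countP_cons]
    rcases List.mem_cons.mp hx with h | h
    · subst h
      have hle : tl.countP p ≤ tl.countP q := List.countP_mono_left (fun a _ => himp a)
      rw [hpx, hqx]
      simp only [Bool.false_eq_true, if_false, if_true]
      omega
    · have := ih h
      have hif : (if p a = true then 1 else 0) ≤ (if q a = true then 1 else 0) := by
        by_cases hpa : p a = true
        · simp [hpa, himp a hpa]
        · simp [hpa]
      omega

-- number of right-hand-side attributes not yet in r
def geSkMissing (F : List (List Int × List Int)) (r : PySem.Set Int) : Nat :=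
  (F.flatMap (fun kv => kv.2)).countP (fun a => !PySem.Set.contains r a)

theorem geSkLoopA_fix (F : List (List Int × List Int)) (fuel : Nat) (r : PySem.Set Int)
    (h : geSkMissing F r < fuel) :
    PySem.Set.equal (geSkLoopA F fuel r) (geSkPassA (geSkLoopA F fuel r) F) = true := by
  induction fuel generalizing r with
  | zero => omega
  | succ n ih =>
    simp only [geSkLoopA]
    by_cases heq : PySem.Set.equal r (geSkPassA r F) = true
    · simpa [heq] using heq
    · simp only [heq]
      refine ih _ ?_
      have hex : ∃ y, y ∈ geSkPassA r F ∧ y ∉ r := by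
        by_contra hno
        push_neg at hno
        exact heq ((PySem.Set.equal_iff _ _).mpr (fun x =>
          ⟨fun hx => geSkPassA_mono F r x hx, fun hx => by
            by_contra hxr
            exact hxr (hno x hx)⟩))
      obtain ⟨y, hy1, hy2⟩ := hex
      have hyfm : y ∈ F.flatMap (fun kv => kv.2) := by
        rcases geSkPassA_elems F r y hy1 with h' | ⟨kv, h1, h2⟩
        · exact absurd h' hy2
        · exact List.mem_flatMap.mpr ⟨kv, h1, h2⟩
      have hlt : geSkMissing F (geSkPassA r F) < geSkMissing F r := by
        refine geSkCountP_lt _ _ _ ?_ y hyfm ?_ ?_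
        · intro a ha
          simp only [Bool.not_eq_true'] at ha ⊢
          cases hcr : PySem.Set.contains r a
          · rfl
          · exfalso
            have hmem : a ∈ geSkPassA r F :=
              geSkPassA_mono F r a ((PySem.Set.contains_iff r a).mp hcr)
            have := (PySem.Set.contains_iff _ a).mpr hmem
            rw [ha] at this
            exact Bool.false_ne_true this
        · simp only [Bool.not_eq_true']
          cases hcr : PySem.Set.contains r y
          · rfl
          · exact absurd ((PySem.Set.contains_iff r y).mp hcr) hy2
        · simp [hy1]
      omega

theorem geSkMissing_le (F : List (List Int × List Int)) (r : PySem.Set Int) :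
    geSkMissing F r ≤ (F.flatMap (fun kv => kv.2)).length :=
  List.countP_le_length

theorem closure_AS_closed (AS : List Int) (F : List (List Int × List Int)) :
    ∀ kv ∈ F, (∀ x ∈ kv.1, x ∈ closure_AS AS F) → ∀ y ∈ kv.2, y ∈ closure_AS AS F := by
  intro kv hkv hsub y hy
  have hfix := geSkLoopA_fix F ((F.flatMap (fun kv => kv.2)).length + 1) AS
    (by have := geSkMissing_le F AS; omega)
  have hfire : y ∈ geSkPassA (closure_AS AS F) F :=
    geSkPassA_fire F kv.1 kv.2 (by simpa using hkv) _ hsub y hy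
  exact ((PySem.Set.equal_iff _ _).mp hfix y).mpr hfire

theorem closure_AS_mem (AS : List Int) (F : List (List Int × List Int)) (y : Int) :
    y ∈ closure_AS AS F ↔ geSkDeriv AS F y := by
  constructor
  · exact fun h => geSkLoopA_sound AS F _ AS (fun z hz => geSkDeriv.base z hz) y h
  · exact fun h => geSkDeriv_le AS F (closure_AS AS F)
      (fun a ha => geSkLoopA_mono F _ AS a ha) (closure_AS_closed AS F) y h

-- ---- generic counting lemmas ----
theorem geSkCountP_split (l : List Int) (p q : Int → Bool) (a : Int)
    (geSk_h : ∀ x, x ≠ a → p x = q x) (geSk_hpa : p a = true) (geSk_hqa : q a = false) :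
    l.countP p = l.countP q + l.count a := by
  induction l with
  | nil => simp
  | cons x tl ih =>
    simp only [List.countP_cons, List.count_cons]
    by_cases hx : x = a
    · subst hx
      rw [geSk_hpa, geSk_hqa, ih]
      simp
      omega
    · rw [geSk_h x hx]
      have hb : (x == a) = false := by simp [hx]
      rw [hb, ih]
      simp
      omega

-- ---- B side: build characterization ----
def geSkBuildFold (F : List (List Int × List Int)) (s : Int)
    (st : PySem.Dict Int (List Int) × PySem.Dict Int Int) :
    PySem.Dict Int (List Int) × PySem.Dict Int Int :=
  (PySem.List.enumerate F s).foldl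
    (fun st p =>
      (p.2.1.foldl (fun occ a => occ.modify a [] (· ++ [p.1])) st.1,
       st.2.insert p.1 (p.2.1.length : Int)))
    st

theorem geSkBuildB_eq (F : List (List Int × List Int)) :
    geSkBuildB F = geSkBuildFold F 0 (PySem.Dict.empty, PySem.Dict.empty) := rfl

-- the per-attribute occurrence list, by specification
def geSkOccSpec (F : List (List Int × List Int)) (s : Int) (a : Int) : List Int :=
  match F with
  | [] => []
  | kv :: F' => List.replicate (kv.1.count a) s ++ geSkOccSpec F' (s + 1) a

theorem geSkOccSpec_mem (F : List (List Int × List Int)) (s : Int) (a j : Int)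
    (hj : j ∈ geSkOccSpec F s a) : ∃ k : Nat, j = s + k ∧ k < F.length := by
  induction F generalizing s with
  | nil => simp [geSkOccSpec] at hj
  | cons kv F' ih =>
    simp only [geSkOccSpec, List.mem_append] at hj
    rcases hj with h | h
    · exact ⟨0, by simpa using (List.eq_of_mem_replicate h), by simp⟩
    · obtain ⟨k, hk1, hk2⟩ := ih (s + 1) h
      exact ⟨k + 1, by push_cast; omega, by simp; omega⟩

theorem geSkOccSpec_count (F : List (List Int × List Int)) (s : Int) (a : Int)
    (k : Nat) (hk : k < F.length) :
    (geSkOccSpec F s a).count (s + (k : Int)) = (F.get ⟨k, hk⟩).1.count a := by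
  induction F generalizing s k with
  | nil => simp at hk
  | cons kv F' ih =>
    cases k with
    | zero =>
      simp only [geSkOccSpec, List.count_append]
      have h1 : (List.replicate (kv.1.count a) s).count (s + ((0:Nat) : Int)) = kv.1.count a := by
        simp
      have h2 : (geSkOccSpec F' (s + 1) a).count (s + ((0:Nat) : Int)) = 0 := by
        rw [List.count_eq_zero]
        intro hmem
        obtain ⟨k, hk1, _⟩ := geSkOccSpec_mem F' (s + 1) a _ hmem
        simp at hk1
        omega
      rw [h1, h2]
      simp
    | succ k' =>
      simp only [geSkOccSpec, List.count_append]
      have h1 : (List.replicate (kv.1.count a) s).count (s + ((k' + 1 : Nat) : Int)) = 0 := by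
        rw [List.count_eq_zero]
        intro hmem
        have := List.eq_of_mem_replicate hmem
        push_cast at this
        omega
      have heq : s + ((k' + 1 : Nat) : Int) = (s + 1) + (k' : Int) := by push_cast; ring
      rw [h1, heq, ih (s + 1) k' (by simpa using Nat.lt_of_succ_lt_succ (by simpa using hk))]
      simp

theorem geSkOccInner (l : List Int) (occ : PySem.Dict Int (List Int)) (i a : Int) :
    (l.foldl (fun occ x => occ.modify x [] (· ++ [i])) occ).getD a [] =
      occ.getD a [] ++ List.replicate (l.count a) i := by
  induction l generalizing occ with
  | nil => simp
  | cons x tl ih =>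
    simp only [List.foldl_cons, List.count_cons]
    rw [ih]
    by_cases hx : a = x
    · subst hx
      rw [PySem.Dict.getD_modify_self]
      simp [List.replicate_succ, List.append_assoc]
    · have hb : (x == a) = false := by simp [Ne.symm hx]
      rw [hb]
      simp [PySem.Dict.getD_modify, hx]

theorem geSkBuildFold_cons (kv : List Int × List Int) (F' : List (List Int × List Int))
    (s : Int) (st : PySem.Dict Int (List Int) × PySem.Dict Int Int) :
    geSkBuildFold (kv :: F') s st =
      geSkBuildFold F' (s + 1)
        (kv.1.foldl (fun occ a => occ.modify a [] (· ++ [s])) st.1,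
         st.2.insert s (kv.1.length : Int)) := by
  simp [geSkBuildFold, PySem.List.enumerate_cons]

theorem geSkBuild_occ (F : List (List Int × List Int)) (s : Int)
    (st : PySem.Dict Int (List Int) × PySem.Dict Int Int) (a : Int) :
    ((geSkBuildFold F s st).1).getD a [] = st.1.getD a [] ++ geSkOccSpec F s a := by
  induction F generalizing s st with
  | nil => simp [geSkBuildFold, geSkOccSpec, PySem.List.enumerate]
  | cons kv F' ih =>
    rw [geSkBuildFold_cons, ih, geSkOccInner]
    simp [geSkOccSpec]

theorem geSkBuild_cnt_lt (F : List (List Int × List Int)) (s : Int)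
    (st : PySem.Dict Int (List Int) × PySem.Dict Int Int) (j : Int) (hj : j < s) :
    ((geSkBuildFold F s st).2).getD j 0 = st.2.getD j 0 := by
  induction F generalizing s st with
  | nil => simp [geSkBuildFold, PySem.List.enumerate]
  | cons kv F' ih =>
    rw [geSkBuildFold_cons, ih (s + 1) _ (by omega)]
    have hne : j ≠ s := by omega
    simp [PySem.Dict.getD_insert, hne]

theorem geSkBuild_cnt (F : List (List Int × List Int)) (s : Int)
    (st : PySem.Dict Int (List Int) × PySem.Dict Int Int) (k : Nat) (hk : k < F.length) :
    ((geSkBuildFold F s st).2).getD (s + (k : Int)) 0 = ((F.get ⟨k, hk⟩).1.length : Int) := by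
  induction F generalizing s st k with
  | nil => simp at hk
  | cons kv F' ih =>
    cases k with
    | zero =>
      rw [geSkBuildFold_cons]
      have : s + ((0 : Nat) : Int) = s := by simp
      rw [this, geSkBuild_cnt_lt F' (s + 1) _ s (by omega)]
      simp [PySem.Dict.getD_insert]
    | succ k' =>
      rw [geSkBuildFold_cons]
      have heq : s + ((k' + 1 : Nat) : Int) = (s + 1) + (k' : Int) := by push_cast; ring
      rw [heq, ih (s + 1) _ k' (by simpa using Nat.lt_of_succ_lt_succ (by simpa using hk))]
      simp

-- ---- B side: fire lemmas ----
theorem geSkFireB_mem (rhs : List Int) (st : PySem.Set Int × List Int) (x : Int) :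
    x ∈ (geSkFireB rhs st).1 ↔ x ∈ st.1 ∨ x ∈ rhs := by
  induction rhs generalizing st with
  | nil => simp [geSkFireB]
  | cons b tl ih =>
    simp only [geSkFireB, List.foldl_cons] at *
    by_cases hc : PySem.Set.contains st.1 b = true
    · rw [if_pos hc, ih]
      have hb : b ∈ st.1 := (PySem.Set.contains_iff _ _).mp hc
      constructor
      · rintro (h | h)
        · exact Or.inl h
        · exact Or.inr (List.mem_cons_of_mem _ h)
      · rintro (h | h)
        · exact Or.inl h
        · rcases List.mem_cons.mp h with h | h
          · exact Or.inl (h ▸ hb)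
          · exact Or.inr h
    · rw [if_neg hc, ih]
      simp only [PySem.Set.mem_add]
      constructor
      · rintro ((h | h) | h)
        · exact Or.inl h
        · exact Or.inr (List.mem_cons.mpr (Or.inl h))
        · exact Or.inr (List.mem_cons_of_mem _ h)
      · rintro (h | h)
        · exact Or.inl (Or.inl h)
        · rcases List.mem_cons.mp h with h | h
          · exact Or.inl (Or.inr h)
          · exact Or.inr h

theorem geSkFireB_qc (rhs : List Int) (st : PySem.Set Int × List Int)
    (h : ∀ a ∈ st.2, a ∈ st.1) : ∀ a ∈ (geSkFireB rhs st).2, a ∈ (geSkFireB rhs st).1 := by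
  induction rhs generalizing st with
  | nil => simpa [geSkFireB] using h
  | cons b tl ih =>
    simp only [geSkFireB, List.foldl_cons] at *
    by_cases hc : PySem.Set.contains st.1 b = true
    · rw [if_pos hc] at *
      exact ih st h
    · rw [if_neg hc] at *
      refine ih (PySem.Set.add st.1 b, st.2 ++ [b]) ?_
      intro a ha
      rcases List.mem_append.mp ha with ha | ha
      · exact (PySem.Set.mem_add _ _ _).mpr (Or.inl (h a ha))
      · exact (PySem.Set.mem_add _ _ _).mpr (Or.inr (by simpa using ha))

theorem geSkFireB_nodup (rhs : List Int) (st : PySem.Set Int × List Int)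
    (h : ∀ a ∈ st.2, a ∈ st.1) (hnd : st.2.Nodup) : (geSkFireB rhs st).2.Nodup := by
  induction rhs generalizing st with
  | nil => simpa [geSkFireB] using hnd
  | cons b tl ih =>
    simp only [geSkFireB, List.foldl_cons] at *
    by_cases hc : PySem.Set.contains st.1 b = true
    · rw [if_pos hc]
      exact ih st h hnd
    · rw [if_neg hc]
      refine ih (PySem.Set.add st.1 b, st.2 ++ [b]) ?_ ?_
      · intro a ha
        rcases List.mem_append.mp ha with ha | ha
        · exact (PySem.Set.mem_add _ _ _).mpr (Or.inl (h a ha))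
        · exact (PySem.Set.mem_add _ _ _).mpr (Or.inr (by simpa using ha))
      · refine List.Nodup.append hnd (List.nodup_singleton b) ?_
        intro x hx hxb
        have : x ∈ st.1 := h x hx
        rw [List.mem_singleton] at hxb
        subst hxb
        exact hc ((PySem.Set.contains_iff _ _).mpr this)

theorem geSkFireB_proc (rhs : List Int) (st : PySem.Set Int × List Int) (x : Int) :
    (x ∈ (geSkFireB rhs st).1 ∧ x ∉ (geSkFireB rhs st).2) ↔ (x ∈ st.1 ∧ x ∉ st.2) := by
  induction rhs generalizing st with
  | nil => simp [geSkFireB]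
  | cons b tl ih =>
    simp only [geSkFireB, List.foldl_cons] at *
    by_cases hc : PySem.Set.contains st.1 b = true
    · rw [if_pos hc]
      exact ih st
    · rw [if_neg hc]
      rw [ih (PySem.Set.add st.1 b, st.2 ++ [b])]
      have hb : b ∉ st.1 := fun hmem => hc ((PySem.Set.contains_iff _ _).mpr hmem)
      simp only [PySem.Set.mem_add, List.mem_append, List.mem_singleton]
      constructor
      · rintro ⟨h1 | h1, h2⟩
        · exact ⟨h1, fun hq => h2 (Or.inl hq)⟩
        · exact absurd h1 (fun h1 => h2 (Or.inr h1))
      · rintro ⟨h1, h2⟩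
        exact ⟨Or.inl h1, fun hq => by
          rcases hq with hq | hq
          · exact h2 hq
          · exact hb (hq ▸ h1)⟩

theorem geSkFireB_nu (F : List (List Int × List Int)) (rhs : List Int)
    (st : PySem.Set Int × List Int) (hsub : ∀ y ∈ rhs, y ∈ F.flatMap (fun kv => kv.2)) :
    (geSkFireB rhs st).2.length + 2 * geSkMissing F (geSkFireB rhs st).1 ≤
      st.2.length + 2 * geSkMissing F st.1 := by
  induction rhs generalizing st with
  | nil => simp [geSkFireB]
  | cons b tl ih =>
    simp only [geSkFireB, List.foldl_cons] at *
    by_cases hc : PySem.Set.contains st.1 b = true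
    · rw [if_pos hc]
      exact ih st (fun y hy => hsub y (List.mem_cons_of_mem _ hy))
    · rw [if_neg hc]
      refine le_trans (ih (PySem.Set.add st.1 b, st.2 ++ [b])
        (fun y hy => hsub y (List.mem_cons_of_mem _ hy))) ?_
      simp only [List.length_append, List.length_singleton]
      have hlt : geSkMissing F (PySem.Set.add st.1 b) < geSkMissing F st.1 := by
        refine geSkCountP_lt _ _ _ ?_ b (hsub b List.mem_cons_self) ?_ ?_
        · intro a ha
          simp only [Bool.not_eq_true'] at ha ⊢
          cases hcr : PySem.Set.contains st.1 a
          · rfl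
          · exfalso
            have : a ∈ PySem.Set.add st.1 b :=
              (PySem.Set.mem_add _ _ _).mpr (Or.inl ((PySem.Set.contains_iff _ _).mp hcr))
            have := (PySem.Set.contains_iff _ _).mpr this
            rw [ha] at this
            exact Bool.false_ne_true this
        · simp only [Bool.not_eq_true']
          cases hcr : PySem.Set.contains st.1 b
          · rfl
          · exact absurd hcr hc
        · simp [PySem.Set.mem_add]
      omega


theorem geSkDecideAnd (p q : Prop) [Decidable p] [Decidable q] :
    (decide p && !decide q) = decide (p ∧ ¬ q) := by
  by_cases hp : p <;> by_cases hq : q <;> simp [hp, hq]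

theorem geSkInner (AS : List Int) (F : List (List Int × List Int)) (PR : Int → Bool) :
    ∀ (L : List Int) (st : PySem.Set Int × List Int × PySem.Dict Int Int),
    (∀ a ∈ st.2.1, a ∈ st.1) →
    st.2.1.Nodup →
    (∀ x ∈ st.1, geSkDeriv AS F x) →
    (∀ x, (decide (x ∈ st.1) && !decide (x ∈ st.2.1)) = PR x) →
    (∀ x, PR x = true → x ∈ st.1) →
    (∀ j ∈ L, ∃ k : Nat, j = (k : Int) ∧ k < F.length) →
    (∀ (k : Nat) (hk : k < F.length),
        st.2.2.getD (k : Int) 0 =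
          ((F.get ⟨k, hk⟩).1.countP (fun x => !PR x) : Int) + (L.count (k : Int) : Int)) →
    (∀ (k : Nat) (hk : k < F.length), st.2.2.getD (k : Int) 0 = 0 →
        ∀ y ∈ (F.get ⟨k, hk⟩).2, y ∈ st.1) →
    ((∀ a ∈ (L.foldl (geSkStepB F) st).2.1, a ∈ (L.foldl (geSkStepB F) st).1) ∧
     (L.foldl (geSkStepB F) st).2.1.Nodup ∧
     (∀ x ∈ (L.foldl (geSkStepB F) st).1, geSkDeriv AS F x) ∧
     (∀ x, (decide (x ∈ (L.foldl (geSkStepB F) st).1) &&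
            !decide (x ∈ (L.foldl (geSkStepB F) st).2.1)) = PR x) ∧
     (∀ x, PR x = true → x ∈ (L.foldl (geSkStepB F) st).1) ∧
     (∀ (k : Nat) (hk : k < F.length),
        (L.foldl (geSkStepB F) st).2.2.getD (k : Int) 0 =
          ((F.get ⟨k, hk⟩).1.countP (fun x => !PR x) : Int)) ∧
     (∀ (k : Nat) (hk : k < F.length), (L.foldl (geSkStepB F) st).2.2.getD (k : Int) 0 = 0 →
        ∀ y ∈ (F.get ⟨k, hk⟩).2, y ∈ (L.foldl (geSkStepB F) st).1) ∧
     (∀ x ∈ st.1, x ∈ (L.foldl (geSkStepB F) st).1) ∧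
     (L.foldl (geSkStepB F) st).2.1.length + 2 * geSkMissing F (L.foldl (geSkStepB F) st).1 ≤
       st.2.1.length + 2 * geSkMissing F st.1) := by
  intro L
  induction L with
  | nil =>
    intro st hQC hnd hsound hproc hPRC hL hcnt hfired
    refine ⟨hQC, hnd, hsound, hproc, hPRC, ?_, hfired, fun x hx => hx, le_refl _⟩
    intro k hk
    have := hcnt k hk
    simpa using this
  | cons j L' ih =>
    intro st hQC hnd hsound hproc hPRC hL hcnt hfired
    obtain ⟨k, hj, hk⟩ := hL j List.mem_cons_self
    subst hj
    simp only [List.foldl_cons]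
    have hstep : geSkStepB F st (k : Int) =
        if (st.2.2.insert (k : Int) (st.2.2.getD (k : Int) 0 - 1)).getD (k : Int) 0 == 0 then
          ((geSkFireB (PySem.List.pyGetD F (k : Int) ([], [])).2 (st.1, st.2.1)).1,
           (geSkFireB (PySem.List.pyGetD F (k : Int) ([], [])).2 (st.1, st.2.1)).2,
           st.2.2.insert (k : Int) (st.2.2.getD (k : Int) 0 - 1))
        else (st.1, st.2.1, st.2.2.insert (k : Int) (st.2.2.getD (k : Int) 0 - 1)) := rfl
    have hget : (st.2.2.insert (k : Int) (st.2.2.getD (k : Int) 0 - 1)).getD (k : Int) 0 =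
        st.2.2.getD (k : Int) 0 - 1 := PySem.Dict.getD_insert_self _ _ _ _
    have hcntk := hcnt k hk
    have hcnt1 : ∀ (k' : Nat) (hk' : k' < F.length),
        (st.2.2.insert (k : Int) (st.2.2.getD (k : Int) 0 - 1)).getD (k' : Int) 0 =
          ((F.get ⟨k', hk'⟩).1.countP (fun x => !PR x) : Int) + (L'.count (k' : Int) : Int) := by
      intro k' hk'
      by_cases hkk : (k' : Int) = (k : Int)
      · have hkk' : k' = k := by exact_mod_cast hkk
        subst hkk'
        rw [PySem.Dict.getD_insert_self, hcnt k' hk']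
        have : (((k' : Int) :: L').count (k' : Int)) = L'.count (k' : Int) + 1 := by
          simp [List.count_cons]
        rw [this]
        push_cast
        ring
      · rw [PySem.Dict.getD_insert, if_neg hkk, hcnt k' hk']
        have : (((k : Int) :: L').count (k' : Int)) = L'.count (k' : Int) := by
          have hb : ((k : Int) == (k' : Int)) = false := by
            simp
            exact fun h => hkk (by rw [h])
          rw [List.count_cons, hb]
          simp
        rw [this]
    by_cases hz : (st.2.2.insert (k : Int) (st.2.2.getD (k : Int) 0 - 1)).getD (k : Int) 0 = 0
    · -- counter hit zero: this FD fires
      have hstep2 : geSkStepB F st (k : Int) =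
          ((geSkFireB (PySem.List.pyGetD F (k : Int) ([], [])).2 (st.1, st.2.1)).1,
           (geSkFireB (PySem.List.pyGetD F (k : Int) ([], [])).2 (st.1, st.2.1)).2,
           st.2.2.insert (k : Int) (st.2.2.getD (k : Int) 0 - 1)) := by
        rw [hstep, if_pos (by simp [hz])]
      have hz' : st.2.2.getD (k : Int) 0 - 1 = 0 := by rw [← hget]; exact hz
      have hcp0 : (F.get ⟨k, hk⟩).1.countP (fun x => !PR x) = 0 ∧ L'.count (k : Int) = 0 := by
        have hc : (((k : Int) :: L').count (k : Int)) = L'.count (k : Int) + 1 := by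
          simp [List.count_cons]
        rw [hc] at hcntk
        constructor <;> omega
      have hrhs : (PySem.List.pyGetD F (k : Int) ([], [])).2 = (F.get ⟨k, hk⟩).2 := by
        rw [PySem.List.pyGetD_natCast, List.getD_eq_getElem _ _ hk]
        rfl
      rw [hrhs] at hstep2
      have hlhs : ∀ x ∈ (F.get ⟨k, hk⟩).1, x ∈ st.1 := by
        intro x hx
        refine hPRC x ?_
        have := List.countP_eq_zero.mp hcp0.1 x hx
        simpa using this
      have hkvmem : ((F.get ⟨k, hk⟩).1, (F.get ⟨k, hk⟩).2) ∈ F := by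
        have := List.get_mem F ⟨k, hk⟩
        simpa using this
      have hrhsder : ∀ y ∈ (F.get ⟨k, hk⟩).2, geSkDeriv AS F y := fun y hy =>
        geSkDeriv.step _ _ y hkvmem (fun x hx => hsound x (hlhs x hx)) hy
      have hrhsflat : ∀ y ∈ (F.get ⟨k, hk⟩).2, y ∈ F.flatMap (fun kv => kv.2) := by
        intro y hy
        exact List.mem_flatMap.mpr ⟨_, hkvmem, hy⟩
      have hQC1 := geSkFireB_qc (F.get ⟨k, hk⟩).2 (st.1, st.2.1) hQC
      have hnd1 := geSkFireB_nodup (F.get ⟨k, hk⟩).2 (st.1, st.2.1) hQC hnd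
      have hmono1 : ∀ x ∈ st.1, x ∈ (geSkFireB (F.get ⟨k, hk⟩).2 (st.1, st.2.1)).1 := by
        intro x hx
        exact (geSkFireB_mem _ _ x).mpr (Or.inl hx)
      have hsound1 : ∀ x ∈ (geSkFireB (F.get ⟨k, hk⟩).2 (st.1, st.2.1)).1, geSkDeriv AS F x := by
        intro x hx
        rcases (geSkFireB_mem _ _ x).mp hx with h | h
        · exact hsound x h
        · exact hrhsder x h
      have hproc1 : ∀ x,
          (decide (x ∈ (geSkFireB (F.get ⟨k, hk⟩).2 (st.1, st.2.1)).1) &&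
           !decide (x ∈ (geSkFireB (F.get ⟨k, hk⟩).2 (st.1, st.2.1)).2)) = PR x := by
        intro x
        rw [geSkDecideAnd, ← hproc x, geSkDecideAnd]
        exact decide_eq_decide.mpr (geSkFireB_proc _ _ x)
      have hPRC1 : ∀ x, PR x = true → x ∈ (geSkFireB (F.get ⟨k, hk⟩).2 (st.1, st.2.1)).1 :=
        fun x hx => hmono1 x (hPRC x hx)
      have hfired1 : ∀ (k' : Nat) (hk' : k' < F.length),
          (st.2.2.insert (k : Int) (st.2.2.getD (k : Int) 0 - 1)).getD (k' : Int) 0 = 0 →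
          ∀ y ∈ (F.get ⟨k', hk'⟩).2, y ∈ (geSkFireB (F.get ⟨k, hk⟩).2 (st.1, st.2.1)).1 := by
        intro k' hk' h0 y hy
        by_cases hkk : (k' : Int) = (k : Int)
        · have hkk' : k' = k := by exact_mod_cast hkk
          subst hkk'
          exact (geSkFireB_mem _ _ y).mpr (Or.inr hy)
        · rw [PySem.Dict.getD_insert, if_neg hkk] at h0
          exact hmono1 y (hfired k' hk' h0 y hy)
      simp only [hstep2]
      have hres := ih ((geSkFireB (F.get ⟨k, hk⟩).2 (st.1, st.2.1)).1,
        (geSkFireB (F.get ⟨k, hk⟩).2 (st.1, st.2.1)).2,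
        st.2.2.insert (k : Int) (st.2.2.getD (k : Int) 0 - 1))
        hQC1 hnd1 hsound1 hproc1 hPRC1
        (fun j hjm => hL j (List.mem_cons_of_mem _ hjm)) hcnt1 hfired1
      dsimp only at hres
      obtain ⟨c1, c2, c3, c4, c5, c6, c7, c8, c9⟩ := hres
      refine ⟨c1, c2, c3, c4, c5, c6, c7, ?_, ?_⟩
      · intro x hx
        exact c8 x (hmono1 x hx)
      · have hnu := geSkFireB_nu F (F.get ⟨k, hk⟩).2 (st.1, st.2.1) hrhsflat
        dsimp only at hnu
        omega
    · -- counter still positive: only the decrement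
      have hstep2 : geSkStepB F st (k : Int) =
          (st.1, st.2.1, st.2.2.insert (k : Int) (st.2.2.getD (k : Int) 0 - 1)) := by
        have hz2 : ¬ (st.2.2.getD (k : Int) 0 - 1 = 0) := by rw [← hget]; exact hz
        rw [hstep, if_neg (by simpa using hz2)]
      simp only [hstep2]
      have hfired1 : ∀ (k' : Nat) (hk' : k' < F.length),
          (st.2.2.insert (k : Int) (st.2.2.getD (k : Int) 0 - 1)).getD (k' : Int) 0 = 0 →
          ∀ y ∈ (F.get ⟨k', hk'⟩).2, y ∈ st.1 := by
        intro k' hk' h0 y hy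
        by_cases hkk : (k' : Int) = (k : Int)
        · exact absurd (hkk ▸ h0) hz
        · rw [PySem.Dict.getD_insert, if_neg hkk] at h0
          exact hfired k' hk' h0 y hy
      exact ih (st.1, st.2.1, st.2.2.insert (k : Int) (st.2.2.getD (k : Int) 0 - 1))
        hQC hnd hsound hproc hPRC
        (fun j hjm => hL j (List.mem_cons_of_mem _ hjm)) hcnt1 hfired1


theorem geSkProc_spec (AS : List Int) (F : List (List Int × List Int)) :
    ∀ (fuel : Nat) (C : PySem.Set Int) (Q : List Int) (cnt : PySem.Dict Int Int),
    Q.length + 2 * geSkMissing F C < fuel →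
    (∀ a ∈ Q, a ∈ C) → Q.Nodup →
    (∀ x ∈ C, geSkDeriv AS F x) →
    (∀ (k : Nat) (hk : k < F.length),
        cnt.getD (k : Int) 0 =
          ((F.get ⟨k, hk⟩).1.countP (fun x => !(decide (x ∈ C) && !decide (x ∈ Q))) : Int)) →
    (∀ (k : Nat) (hk : k < F.length), cnt.getD (k : Int) 0 = 0 →
        ∀ y ∈ (F.get ⟨k, hk⟩).2, y ∈ C) →
    ((∀ y ∈ geSkProcB F (geSkBuildB F).1 fuel C Q cnt, geSkDeriv AS F y) ∧
     (∀ x ∈ C, x ∈ geSkProcB F (geSkBuildB F).1 fuel C Q cnt) ∧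
     (∀ kv ∈ F, (∀ x ∈ kv.1, x ∈ geSkProcB F (geSkBuildB F).1 fuel C Q cnt) →
        ∀ y ∈ kv.2, y ∈ geSkProcB F (geSkBuildB F).1 fuel C Q cnt)) := by
  intro fuel
  induction fuel with
  | zero =>
    intro C Q cnt h
    omega
  | succ n ih =>
    intro C Q cnt hnu hQC hnd hsound hcnt hfired
    by_cases hQ : Q = []
    · subst hQ
      have hres : geSkProcB F (geSkBuildB F).1 (n + 1) C [] cnt = C := by
        simp [geSkProcB, PySem.List.pop?]
      rw [hres]
      refine ⟨hsound, fun x hx => hx, ?_⟩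
      intro kv hkv hsub y hy
      obtain ⟨idx, hidx⟩ := List.mem_iff_get.mp hkv
      subst hidx
      have hzero : (F.get idx).1.countP
          (fun x => !(decide (x ∈ C) && !decide (x ∈ ([] : List Int)))) = 0 := by
        refine List.countP_eq_zero.mpr ?_
        intro x hx
        simp [hsub x hx]
      have hc := hcnt idx.1 idx.2
      have hc0 : cnt.getD ((idx.1 : Nat) : Int) 0 = 0 := by
        rw [hc]
        have : F.get ⟨idx.1, idx.2⟩ = F.get idx := by simp
        rw [this, hzero]
        simp
      have := hfired idx.1 idx.2 hc0
      have hgeteq : F.get ⟨idx.1, idx.2⟩ = F.get idx := by simp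
      rw [hgeteq] at this
      exact this y hy
    · have hQdec : Q.dropLast ++ [Q.getLast hQ] = Q := List.dropLast_append_getLast hQ
      have hpop : PySem.List.pop? Q (-1) = some (Q.getLast hQ, Q.dropLast) := by
        conv_lhs => rw [← hQdec]
        exact PySem.List.pop?_last Q.dropLast (Q.getLast hQ)
      have hres : geSkProcB F (geSkBuildB F).1 (n + 1) C Q cnt =
          geSkProcB F (geSkBuildB F).1 n
            ((((geSkBuildB F).1.getD (Q.getLast hQ) []).foldl (geSkStepB F) (C, Q.dropLast, cnt)).1)
            ((((geSkBuildB F).1.getD (Q.getLast hQ) []).foldl (geSkStepB F) (C, Q.dropLast, cnt)).2.1)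
            ((((geSkBuildB F).1.getD (Q.getLast hQ) []).foldl (geSkStepB F) (C, Q.dropLast, cnt)).2.2) := by
        simp [geSkProcB, hpop]
      have hocc : (geSkBuildB F).1.getD (Q.getLast hQ) [] = geSkOccSpec F 0 (Q.getLast hQ) := by
        rw [geSkBuildB_eq]
        have := geSkBuild_occ F 0 (PySem.Dict.empty, PySem.Dict.empty) (Q.getLast hQ)
        simpa using this
      have haQ : Q.getLast hQ ∈ Q := List.getLast_mem hQ
      have haC : Q.getLast hQ ∈ C := hQC _ haQ
      have hndQ : (Q.dropLast ++ [Q.getLast hQ]).Nodup := by rw [hQdec]; exact hnd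
      have haQ' : Q.getLast hQ ∉ Q.dropLast := by
        intro h
        have := List.nodup_append.mp hndQ
        exact this.2.2 _ h _ (List.mem_singleton.mpr rfl) rfl
      have hmemQ : ∀ x, x ≠ Q.getLast hQ → (x ∈ Q ↔ x ∈ Q.dropLast) := by
        intro x hx
        rw [← hQdec]
        simp [List.mem_append, hx]
      have hinner := geSkInner AS F
        (fun x => decide (x ∈ C) && !decide (x ∈ Q.dropLast))
        (geSkOccSpec F 0 (Q.getLast hQ)) (C, Q.dropLast, cnt)
        (fun x hx => hQC x (List.mem_of_mem_dropLast hx))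
        (List.Nodup.sublist (List.dropLast_sublist Q) hnd)
        hsound
        (fun x => rfl)
        (fun x hx => by
          have := (Bool.and_eq_true _ _).mp hx
          exact of_decide_eq_true this.1)
        (fun j hj => by
          obtain ⟨k, hk1, hk2⟩ := geSkOccSpec_mem F 0 (Q.getLast hQ) j hj
          exact ⟨k, by simpa using hk1, hk2⟩)
        (fun k hk => by
          have hcountocc := geSkOccSpec_count F 0 (Q.getLast hQ) k hk
          have hsplit := geSkCountP_split (F.get ⟨k, hk⟩).1
            (fun x => !(decide (x ∈ C) && !decide (x ∈ Q)))
            (fun x => !(decide (x ∈ C) && !decide (x ∈ Q.dropLast)))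
            (Q.getLast hQ)
            (fun x hx => by
              have := hmemQ x hx
              simp [this])
            (by simp [haQ])
            (by simp [haC, haQ'])
          rw [hcnt k hk, hsplit]
          have : ((0 : Int) + (k : Int)) = (k : Int) := by ring
          rw [this] at hcountocc
          rw [hcountocc]
          push_cast
          ring)
        hfired
      dsimp only at hinner
      obtain ⟨i1, i2, i3, i4, i5, i6, i7, i8, i9⟩ := hinner
      rw [hres, hocc]
      have hQlen : Q.length = Q.dropLast.length + 1 := by
        conv_lhs => rw [← hQdec]
        simp
      have hcong : (fun x => !(decide (x ∈ ((geSkOccSpec F 0 (Q.getLast hQ)).foldl (geSkStepB F) (C, Q.dropLast, cnt)).1) &&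
            !decide (x ∈ ((geSkOccSpec F 0 (Q.getLast hQ)).foldl (geSkStepB F) (C, Q.dropLast, cnt)).2.1)))
          = (fun x => !(decide (x ∈ C) && !decide (x ∈ Q.dropLast))) := by
        funext x
        rw [i4 x]
      have hihres := ih _ _ _
        (by omega)
        i1 i2 i3
        (fun k hk => by rw [i6 k hk, ← hcong])
        i7
      refine ⟨hihres.1, ?_, hihres.2.2⟩
      intro x hx
      exact hihres.2.1 x (i8 x hx)

-- the init loop, generalized over the enumerate start
def geSkInitFold (G : List (List Int × List Int)) (s : Int) (cnt : PySem.Dict Int Int)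
    (st : PySem.Set Int × List Int) : PySem.Set Int × List Int :=
  (PySem.List.enumerate G s).foldl
    (fun st p => if cnt.getD p.1 0 == 0 then geSkFireB p.2.2 st else st) st

theorem geSkInitB_eq (F : List (List Int × List Int)) (cnt : PySem.Dict Int Int)
    (st : PySem.Set Int × List Int) : geSkInitB F cnt st = geSkInitFold F 0 cnt st := rfl

theorem geSkInit_spec (AS : List Int) (F : List (List Int × List Int)) (cnt : PySem.Dict Int Int) :
    ∀ (G : List (List Int × List Int)) (s : Int) (st : PySem.Set Int × List Int),
    (∀ kv ∈ G, kv ∈ F) →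
    (∀ (k : Nat) (hk : k < G.length), cnt.getD (s + (k : Int)) 0 = ((G.get ⟨k, hk⟩).1.length : Int)) →
    (∀ a ∈ st.2, a ∈ st.1) → st.2.Nodup →
    (∀ x ∈ st.1, geSkDeriv AS F x) →
    (∀ x, x ∈ st.1 → x ∈ st.2) →
    ((∀ a ∈ (geSkInitFold G s cnt st).2, a ∈ (geSkInitFold G s cnt st).1) ∧
     (geSkInitFold G s cnt st).2.Nodup ∧
     (∀ x ∈ (geSkInitFold G s cnt st).1, geSkDeriv AS F x) ∧
     (∀ x, x ∈ (geSkInitFold G s cnt st).1 → x ∈ (geSkInitFold G s cnt st).2) ∧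
     (∀ x ∈ st.1, x ∈ (geSkInitFold G s cnt st).1) ∧
     (geSkInitFold G s cnt st).2.length + 2 * geSkMissing F (geSkInitFold G s cnt st).1 ≤
       st.2.length + 2 * geSkMissing F st.1 ∧
     (∀ (k : Nat) (hk : k < G.length), cnt.getD (s + (k : Int)) 0 = 0 →
        ∀ y ∈ (G.get ⟨k, hk⟩).2, y ∈ (geSkInitFold G s cnt st).1)) := by
  intro G
  induction G with
  | nil =>
    intro s st hG hlen hQC hnd hsound hproc
    refine ⟨hQC, hnd, hsound, hproc, fun x hx => hx, le_refl _, ?_⟩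
    intro k hk
    simp at hk
  | cons kv G' ihG =>
    intro s st hG hlen hQC hnd hsound hproc
    have hunf : geSkInitFold (kv :: G') s cnt st =
        geSkInitFold G' (s + 1) cnt
          (if cnt.getD s 0 == 0 then geSkFireB kv.2 st else st) := by
      simp [geSkInitFold, PySem.List.enumerate_cons]
    have hlen0 : cnt.getD s 0 = (kv.1.length : Int) := by
      have := hlen 0 (by simp)
      simpa using this
    have hkvF : kv ∈ F := hG kv List.mem_cons_self
    have hflat : ∀ y ∈ kv.2, y ∈ F.flatMap (fun kv => kv.2) := by
      intro y hy
      exact List.mem_flatMap.mpr ⟨kv, hkvF, hy⟩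
    by_cases h0 : cnt.getD s 0 = 0
    · -- lhs is empty: this FD fires unconditionally
      have hlhsnil : kv.1 = [] := by
        have : (kv.1.length : Int) = 0 := by rw [← hlen0]; exact h0
        have : kv.1.length = 0 := by exact_mod_cast this
        exact List.length_eq_zero_iff.mp this
      have hrhsder : ∀ y ∈ kv.2, geSkDeriv AS F y := by
        intro y hy
        refine geSkDeriv.step kv.1 kv.2 y (by simpa using hkvF) ?_ hy
        rw [hlhsnil]
        intro x hx
        simp at hx
      have hif : (if cnt.getD s 0 == 0 then geSkFireB kv.2 st else st) = geSkFireB kv.2 st := by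
        simp [h0]
      rw [hunf, hif]
      have hQC1 := geSkFireB_qc kv.2 st hQC
      have hnd1 := geSkFireB_nodup kv.2 st hQC hnd
      have hsound1 : ∀ x ∈ (geSkFireB kv.2 st).1, geSkDeriv AS F x := by
        intro x hx
        rcases (geSkFireB_mem _ _ x).mp hx with h | h
        · exact hsound x h
        · exact hrhsder x h
      have hproc1 : ∀ x, x ∈ (geSkFireB kv.2 st).1 → x ∈ (geSkFireB kv.2 st).2 := by
        intro x hx
        by_contra hnx
        have := (geSkFireB_proc kv.2 st x).mp ⟨hx, hnx⟩
        exact (fun h => h this.2) (fun _ => this.2 (hproc x this.1))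
      have hmono1 : ∀ x ∈ st.1, x ∈ (geSkFireB kv.2 st).1 :=
        fun x hx => (geSkFireB_mem _ _ x).mpr (Or.inl hx)
      have hres := ihG (s + 1) (geSkFireB kv.2 st)
        (fun kv' h => hG kv' (List.mem_cons_of_mem _ h))
        (fun k hk => by
          have := hlen (k + 1) (by simpa using Nat.succ_lt_succ hk)
          have heq : s + ((k + 1 : Nat) : Int) = (s + 1) + (k : Int) := by push_cast; ring
          rw [heq] at this
          simpa using this)
        hQC1 hnd1 hsound1 hproc1
      obtain ⟨j1, j2, j3, j4, j5, j6, j7⟩ := hres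
      refine ⟨j1, j2, j3, j4, fun x hx => j5 x (hmono1 x hx), ?_, ?_⟩
      · have := geSkFireB_nu F kv.2 st hflat
        omega
      · intro k hk h0'
        cases k with
        | zero =>
          intro y hy
          refine j5 y ?_
          exact (geSkFireB_mem _ _ y).mpr (Or.inr (by simpa using hy))
        | succ k' =>
          intro y hy
          have heq : s + ((k' + 1 : Nat) : Int) = (s + 1) + (k' : Int) := by push_cast; ring
          rw [heq] at h0'
          have hk' : k' < G'.length := by simpa using Nat.lt_of_succ_lt_succ (by simpa using hk)
          exact j7 k' hk' h0' y hy
    · have hif : (if cnt.getD s 0 == 0 then geSkFireB kv.2 st else st) = st := by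
        simp [h0]
      rw [hunf, hif]
      have hres := ihG (s + 1) st
        (fun kv' h => hG kv' (List.mem_cons_of_mem _ h))
        (fun k hk => by
          have := hlen (k + 1) (by simpa using Nat.succ_lt_succ hk)
          have heq : s + ((k + 1 : Nat) : Int) = (s + 1) + (k : Int) := by push_cast; ring
          rw [heq] at this
          simpa using this)
        hQC hnd hsound hproc
      obtain ⟨j1, j2, j3, j4, j5, j6, j7⟩ := hres
      refine ⟨j1, j2, j3, j4, j5, j6, ?_⟩
      intro k hk h0'
      cases k with
      | zero =>
        exfalso
        apply h0
        simpa using h0'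
      | succ k' =>
        have heq : s + ((k' + 1 : Nat) : Int) = (s + 1) + (k' : Int) := by push_cast; ring
        rw [heq] at h0'
        have hk' : k' < G'.length := by simpa using Nat.lt_of_succ_lt_succ (by simpa using hk)
        exact j7 k' hk' h0'


theorem closure_linear_mem (AS : List Int) (F : List (List Int × List Int)) (y : Int) :
    y ∈ closure_linear AS F (geSkBuildB F).1 (geSkBuildB F).2 ↔ geSkDeriv AS F y := by
  have hdef : closure_linear AS F (geSkBuildB F).1 (geSkBuildB F).2 =
      geSkProcB F (geSkBuildB F).1
        (AS.length + 2 * (F.flatMap (fun kv => kv.2)).length + 1)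
        (geSkInitB F (geSkBuildB F).2 (PySem.Set.ofList AS, PySem.Set.ofList AS)).1
        (geSkInitB F (geSkBuildB F).2 (PySem.Set.ofList AS, PySem.Set.ofList AS)).2
        (geSkBuildB F).2 := rfl
  have hlen : ∀ (k : Nat) (hk : k < F.length),
      (geSkBuildB F).2.getD ((0 : Int) + (k : Int)) 0 = ((F.get ⟨k, hk⟩).1.length : Int) := by
    intro k hk
    rw [geSkBuildB_eq]
    exact geSkBuild_cnt F 0 _ k hk
  have hinit := geSkInit_spec AS F (geSkBuildB F).2 F 0
    (PySem.Set.ofList AS, PySem.Set.ofList AS)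
    (fun kv h => h) hlen
    (fun a ha => ha)
    (PySem.Set.nodup_ofList AS)
    (fun x hx => geSkDeriv.base x ((PySem.Set.mem_ofList _ _).mp hx))
    (fun x hx => hx)
  rw [← geSkInitB_eq] at hinit
  obtain ⟨j1, j2, j3, j4, j5, j6, j7⟩ := hinit
  have hcnt : ∀ (k : Nat) (hk : k < F.length),
      (geSkBuildB F).2.getD (k : Int) 0 =
        ((F.get ⟨k, hk⟩).1.countP (fun x =>
          !(decide (x ∈ (geSkInitB F (geSkBuildB F).2 (PySem.Set.ofList AS, PySem.Set.ofList AS)).1) &&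
            !decide (x ∈ (geSkInitB F (geSkBuildB F).2 (PySem.Set.ofList AS, PySem.Set.ofList AS)).2))) : Int) := by
    intro k hk
    have h1 := hlen k hk
    have h2 : (F.get ⟨k, hk⟩).1.countP (fun x =>
        !(decide (x ∈ (geSkInitB F (geSkBuildB F).2 (PySem.Set.ofList AS, PySem.Set.ofList AS)).1) &&
          !decide (x ∈ (geSkInitB F (geSkBuildB F).2 (PySem.Set.ofList AS, PySem.Set.ofList AS)).2))) =
        (F.get ⟨k, hk⟩).1.length := by
      rw [List.countP_congr (q := fun _ => true) ?_]
      · exact congrFun List.countP_true _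
      · intro x hx
        constructor
        · intro
          rfl
        · intro
          simp only [Bool.not_eq_true', Bool.and_eq_false_iff]
          by_cases hxC : x ∈ (geSkInitB F (geSkBuildB F).2 (PySem.Set.ofList AS, PySem.Set.ofList AS)).1
          · right
            simp [j4 x hxC]
          · left
            simp [hxC]
    rw [h2]
    simpa using h1
  have hproc := geSkProc_spec AS F
    (AS.length + 2 * (F.flatMap (fun kv => kv.2)).length + 1)
    (geSkInitB F (geSkBuildB F).2 (PySem.Set.ofList AS, PySem.Set.ofList AS)).1
    (geSkInitB F (geSkBuildB F).2 (PySem.Set.ofList AS, PySem.Set.ofList AS)).2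
    (geSkBuildB F).2
    (by
      have h1 := j6
      dsimp only at h1
      have h2 : (PySem.Set.ofList AS).length ≤ AS.length := PySem.Set.length_ofList_le AS
      have h3 := geSkMissing_le F (PySem.Set.ofList AS)
      omega)
    j1 j2 j3 hcnt
    (fun k hk h0 => by
      have := j7 k hk (by simpa using h0)
      exact this)
  obtain ⟨p1, p2, p3⟩ := hproc
  rw [hdef]
  constructor
  · exact fun h => p1 y h
  · intro h
    refine geSkDeriv_le AS F _ ?_ p3 y h
    intro a ha
    exact p2 a (j5 a ((PySem.Set.mem_ofList _ _).mpr ha))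

-- the two closures agree as sets, hence the two superkey tests agree
theorem geSk_cond_eq (R : List Int) (F : List (List Int × List Int)) (AS : List Int) :
    PySem.Set.equal (closure_AS AS F) R =
      PySem.Set.equal (closure_linear AS F (geSkBuildB F).1 (geSkBuildB F).2) R := by
  have hm : ∀ x : Int, x ∈ closure_AS AS F ↔ x ∈ closure_linear AS F (geSkBuildB F).1 (geSkBuildB F).2 :=
    fun x => (closure_AS_mem AS F x).trans (closure_linear_mem AS F x).symm
  refine Bool.eq_iff_iff.mpr ?_
  rw [PySem.Set.equal_iff _ _, PySem.Set.equal_iff _ _]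
  exact ⟨fun h x => (hm x).symm.trans (h x), fun h x => (hm x).trans (h x)⟩

-- ===== VERDICT (by name: the statement is the Claim_ definition above) =====
theorem ge_superkey_spec : Claim_equal_ge_superkey := by
  intro R F _
  unfold Spec_ge_superkey ge_superkey ge_superkey_alt
  have hfun : (fun (K : List (List Int)) (kv : List Int × List Int) =>
      if PySem.Set.equal (closure_AS kv.1 F) R then PySem.Set.add K (PySem.Set.ofList kv.1) else K)
      = (fun (K : List (List Int)) (kv : List Int × List Int) =>
      if PySem.Set.equal (closure_linear kv.1 F (geSkBuildB F).1 (geSkBuildB F).2) R then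
        PySem.Set.add K (PySem.Set.ofList kv.1) else K) := by
    funext K kv
    rw [geSk_cond_eq]
  rw [hfun]
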